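-- pv_equiv track=rewrite | github.com/RakaSP/NT-NSGA-II | debug.py | count_total_paths
-- ===== SOURCE A (Python) =====
-- import math
--
-- def count_total_paths(n_nodes: int, max_subset: int | None = None) -> int:
--     """Return sum_{k=2}^{max_subset} P(n,k)."""
--     if n_nodes < 2:
--         return 0
--     if max_subset is None or max_subset > n_nodes:
--         max_subset = n_nodes
--     total = 0
--     fact = math.factorial
--     for k in range(2, max_subset + 1):
--         total += fact(n_nodes) // fact(n_nodes - k)
--     return total
-- ===== SOURCE B (Python) =====
-- def count_total_paths(n_nodes: int, max_subset: int | None = None) -> int: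
--     """Return sum_{k=2}^{max_subset} P(n,k)."""
--     if n_nodes < 2:
--         return 0
--     m = n_nodes if max_subset is None or max_subset > n_nodes else max_subset
--     if m < 2:
--         return 0
--     p = n_nodes * (n_nodes - 1)
--     total = p
--     for k in range(3, m + 1):
--         p *= n_nodes - k + 1
--         total += p
--     return total
-- ===== Notes on version B (the rewrite author's own statement) =====
-- stated objective: faster
-- what changed: Replaces the per-term computation factorial(n)//factorial(n-k) with an incremental running product P(n,k)=P(n,k-1)*(n-k+1), so each term costs one multiplication instead of two big factorials and a bigint division.
import Mathlib
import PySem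

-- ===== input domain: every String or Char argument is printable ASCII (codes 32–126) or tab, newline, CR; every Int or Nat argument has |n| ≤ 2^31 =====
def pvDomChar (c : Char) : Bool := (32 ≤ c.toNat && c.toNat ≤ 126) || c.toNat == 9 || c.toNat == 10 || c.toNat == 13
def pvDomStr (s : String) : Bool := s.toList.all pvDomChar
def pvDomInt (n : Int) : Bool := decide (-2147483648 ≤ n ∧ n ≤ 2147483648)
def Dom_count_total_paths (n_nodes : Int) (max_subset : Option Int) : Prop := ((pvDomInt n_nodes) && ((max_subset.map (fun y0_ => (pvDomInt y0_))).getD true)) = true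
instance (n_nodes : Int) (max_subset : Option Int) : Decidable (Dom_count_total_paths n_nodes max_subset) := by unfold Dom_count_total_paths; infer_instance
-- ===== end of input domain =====

-- B replaces the per-term factorial-quotient with an incremental running product
-- P(n,k) = P(n,k-1)·(n-k+1): one pass, one multiplication per term (objective: faster).

-- ===== PORT A =====
-- math.factorial (only applied to nonnegative arguments here)
def pyFact (x : Int) : Int := (Nat.factorial x.toNat : Int)

def count_total_paths (n_nodes : Int) (max_subset : Option Int) : Int :=
  if n_nodes < 2 then 0
  else
    let m : Int := match max_subset with
      | none => n_nodes
      | some v => if v > n_nodes then n_nodes else v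
    (PySem.List.pyRange 2 (m + 1) 1).foldl
      (fun total k => total + PySem.Int.floordiv (pyFact n_nodes) (pyFact (n_nodes - k))) 0

-- ===== PORT B =====
def count_total_paths_alt (n_nodes : Int) (max_subset : Option Int) : Int :=
  if n_nodes < 2 then 0
  else
    let m : Int := match max_subset with
      | none => n_nodes
      | some v => if v > n_nodes then n_nodes else v
    if m < 2 then 0
    else
      let p0 := n_nodes * (n_nodes - 1)
      let st := (PySem.List.pyRange 3 (m + 1) 1).foldl
        (fun (st : Int × Int) k => let p := st.1 * (n_nodes - k + 1); (p, st.2 + p))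
        (p0, p0)
      st.2

-- ===== PRECONDITION & SPEC =====
def Spec_count_total_paths (n_nodes : Int) (max_subset : Option Int) (out : Int) : Prop := out = count_total_paths_alt n_nodes max_subset
instance (n_nodes : Int) (max_subset : Option Int) (out : Int) : Decidable (Spec_count_total_paths n_nodes max_subset out) := by unfold Spec_count_total_paths; infer_instance

-- ===== CLAIM (what is proved, stated in full; the proofs are below) =====
def Claim_equal_count_total_paths : Prop := ∀ (n_nodes : Int) (max_subset : Option Int), Dom_count_total_paths n_nodes max_subset → Spec_count_total_paths n_nodes max_subset (count_total_paths n_nodes max_subset)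

-- ===== LEMMAS AND PROOFS =====

-- exact factorial quotient: n!/(n-k)! is the descending factorial, for k ≤ n
lemma pyFact_quot (n k : Nat) (hk : k ≤ n) :
    PySem.Int.floordiv (pyFact (n : Int)) (pyFact ((n : Int) - (k : Int)))
      = (Nat.descFactorial n k : Int) := by
  have hsub : ((n : Int) - (k : Int)) = ((n - k : Nat) : Int) := by omega
  rw [hsub]
  simp only [pyFact, Int.toNat_natCast]
  rw [PySem.Int.floordiv_natCast]
  norm_cast
  rw [Nat.descFactorial_eq_div hk]

-- the joint invariant of B's fold against A's fold, by induction on the upper bound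
lemma fold_invariant (n : Nat) (hn : 2 ≤ n) : ∀ (m : Nat), 2 ≤ m → m ≤ n →
    (PySem.List.pyRange 3 ((m : Int) + 1) 1).foldl
        (fun (st : Int × Int) k => ((st.1 * ((n : Int) - k + 1), st.2 + st.1 * ((n : Int) - k + 1)) : Int × Int))
        ((n : Int) * ((n : Int) - 1), (n : Int) * ((n : Int) - 1))
      = ((Nat.descFactorial n m : Int),
         (PySem.List.pyRange 2 ((m : Int) + 1) 1).foldl
           (fun total k => total + PySem.Int.floordiv (pyFact (n : Int)) (pyFact ((n : Int) - k))) 0) := by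
  intro m
  induction m with
  | zero => omega
  | succ m ih =>
    intro h2 hle
    by_cases hm : m = 1
    · subst hm
      have hb : (((1 + 1 : Nat) : Int) + 1) = (3 : Int) := by norm_num
      rw [hb]
      have e3 : PySem.List.pyRange 3 3 1 = [] := PySem.List.pyRange_one_eq_nil (by norm_num)
      have e2 : PySem.List.pyRange 2 3 1 = [2] := by
        have := PySem.List.pyRange_one_singleton (a := (2 : Int))
        norm_num at this
        exact this
      rw [e3, e2]
      simp only [List.foldl, Prod.mk.injEq]
      have hq := pyFact_quot n 2 hn
      push_cast at hq
      have hd2 : ((Nat.descFactorial n 2 : Nat) : Int) = (n : Int) * ((n : Int) - 1) := by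
        rw [Nat.descFactorial_succ, Nat.descFactorial_one]
        push_cast [Nat.cast_sub (show 1 ≤ n by omega)]
        ring
      have h11 : (1 + 1 : Nat) = 2 := by norm_num
      rw [h11, hd2, hq, hd2]
      constructor
      · rfl
      · ring
    · have h2m : 2 ≤ m := by omega
      have hmn : m ≤ n := by omega
      have ihm := ih h2m hmn
      have hsplit3 : PySem.List.pyRange 3 (((m + 1 : Nat) : Int) + 1) 1
          = PySem.List.pyRange 3 ((m : Int) + 1) 1 ++ [((m : Int) + 1)] := by
        have := PySem.List.pyRange_one_succ_right (a := 3) (b := (m : Int) + 1) (by omega)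
        exact_mod_cast this
      have hsplit2 : PySem.List.pyRange 2 (((m + 1 : Nat) : Int) + 1) 1
          = PySem.List.pyRange 2 ((m : Int) + 1) 1 ++ [((m : Int) + 1)] := by
        have := PySem.List.pyRange_one_succ_right (a := 2) (b := (m : Int) + 1) (by omega)
        exact_mod_cast this
      rw [hsplit3, hsplit2, List.foldl_append, List.foldl_append, ihm]
      simp only [List.foldl, Prod.mk.injEq]
      have hq := pyFact_quot n (m + 1) (by omega)
      push_cast at hq
      have hd : ((Nat.descFactorial n (m + 1) : Nat) : Int)
          = (Nat.descFactorial n m : Int) * ((n : Int) - ((m : Int) + 1) + 1) := by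
        rw [Nat.descFactorial_succ]
        have hc : ((n : Int) - ((m : Int) + 1) + 1) = ((n - m : Nat) : Int) := by omega
        rw [hc]; push_cast; ring
      constructor
      · exact hd.symm
      · rw [hq, hd]

-- ===== VERDICT (by name: the statement is the Claim_ definition above) =====
-- the two folds agree for any upper bound m ≤ n (helper for the verdict)
lemma main_eq (n m : Int) (hn : 2 ≤ n) (hmn : m ≤ n) :
    (PySem.List.pyRange 2 (m + 1) 1).foldl
        (fun total k => total + PySem.Int.floordiv (pyFact n) (pyFact (n - k))) 0
      = (if m < 2 then 0
         else ((PySem.List.pyRange 3 (m + 1) 1).foldl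
            (fun (st : Int × Int) k => (st.1 * (n - k + 1), st.2 + st.1 * (n - k + 1)))
            (n * (n - 1), n * (n - 1))).2) := by
  by_cases hm2 : m < 2
  · rw [if_pos hm2, PySem.List.pyRange_one_eq_nil (by omega)]
    rfl
  · rw [if_neg hm2]
    push Not at hm2
    obtain ⟨N, rfl⟩ : ∃ N : Nat, n = (N : Int) := ⟨n.toNat, by omega⟩
    obtain ⟨M, rfl⟩ : ∃ M : Nat, m = (M : Int) := ⟨m.toNat, by omega⟩
    have hN : 2 ≤ N := by exact_mod_cast hn
    have hM2 : 2 ≤ M := by exact_mod_cast hm2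
    have hMN : M ≤ N := by exact_mod_cast hmn
    rw [fold_invariant N hN M hM2 hMN]

-- ===== VERDICT (by name: the statement is the Claim_ definition above) =====
theorem count_total_paths_spec : Claim_equal_count_total_paths := by
  intro n ms _
  unfold Spec_count_total_paths count_total_paths count_total_paths_alt
  by_cases hn : n < 2
  · simp only [if_pos hn]
  · simp only [if_neg hn]
    push Not at hn
    rcases ms with _ | v
    · dsimp only
      exact main_eq n n hn le_rfl
    · dsimp only
      by_cases hv : v > n
      · simp only [if_pos hv]
        exact main_eq n n hn le_rfl
      · simp only [if_neg hv]
        exact main_eq n v hn (by omega)
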